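-- pv_equiv track=rewrite | github.com/noironetworks/python-opflex-agent | opflexagent/utils/ep_managers/endpoint_file_manager.py | _list_to_range
-- ===== SOURCE A (Python) =====
-- def _list_to_range(vlans_list):
--     vlans_list = list(set(vlans_list))
--     vlans_list = list(filter(lambda a: a > 0 and a < 4094, vlans_list))
--     vlans_list.sort()
--     vlan_ranges = []
--     while vlans_list:
--         if len(vlans_list) == 1:
--             vlan_ranges.append({'start': vlans_list[0]})
--             vlans_list.remove(vlans_list[0])
--             break
--
--         start = vlans_list[0]
--         end = start
--         vlans_list.remove(vlans_list[0])
--         while vlans_list: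
--             if (vlans_list[0] - end) == 1:
--                 end = vlans_list[0]
--                 vlans_list.remove(vlans_list[0])
--             else:
--                 break
--
--         if end and end != start:
--             vlan_ranges.append({'start': start, 'end': end})
--         else:
--             vlan_ranges.append({'start': start})
--
--     return vlan_ranges
-- ===== SOURCE B (Python) =====
-- def _list_to_range(vlans_list):
--     vs = sorted({v for v in vlans_list if 0 < v < 4094})
--     ranges = []
--     for v in vs:
--         if ranges and v == ranges[-1][1] + 1:
--             ranges[-1][1] = v
--         else:
--             ranges.append([v, v])
--     return [{'start': s} if s == e else {'start': s, 'end': e}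
--             for s, e in ranges]
-- ===== Notes on version B (the rewrite author's own statement) =====
-- stated objective: faster
-- what changed: Replaced the destructive while-loops that repeatedly call list.remove (an O(n) shift each time) with one forward pass over the sorted unique list that extends or starts the current range incrementally.
import Mathlib
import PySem

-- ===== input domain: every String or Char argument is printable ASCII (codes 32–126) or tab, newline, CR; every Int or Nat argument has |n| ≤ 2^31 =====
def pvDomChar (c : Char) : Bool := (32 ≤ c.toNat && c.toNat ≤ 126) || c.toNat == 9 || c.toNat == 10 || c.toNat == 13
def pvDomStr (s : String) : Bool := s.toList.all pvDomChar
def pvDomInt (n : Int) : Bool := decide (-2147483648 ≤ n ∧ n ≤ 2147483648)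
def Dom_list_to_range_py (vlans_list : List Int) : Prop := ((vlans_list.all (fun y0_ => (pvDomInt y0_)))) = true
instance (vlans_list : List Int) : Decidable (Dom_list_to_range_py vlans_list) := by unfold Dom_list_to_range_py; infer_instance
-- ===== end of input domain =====

-- B replaces A's destructive while-loops (repeated list.remove, O(n) each) with one
-- forward pass over the sorted unique list that extends or starts the current range
-- incrementally; objective: faster (asymptotic, O(n^2) → O(n log n)).

-- ===== PORT A =====
-- inner 'while vlans_list: if vlans_list[0]-end == 1: end = vlans_list[0]; remove; else break'
def pyAInner (endv : Int) (l : List Int) : Int × List Int :=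
  match l with
  | [] => (endv, l)
  | x :: rest => if x - endv = 1 then pyAInner x rest else (endv, l)

-- termination measure for the outer loop (the remaining list only shrinks)
lemma pyAInner_length_le (endv : Int) (l : List Int) :
    (pyAInner endv l).2.length ≤ l.length := by
  induction l generalizing endv with
  | nil => simp [pyAInner]
  | cons x rest ih =>
    simp only [pyAInner]
    split
    · exact (ih x).trans (Nat.le_succ _)
    · exact Nat.le_refl _

-- outer 'while vlans_list' loop of A
def pyAOuter : List Int → List (List (String × Int))
  | [] => []
  | [x] => [[("start", x)]]
  | x :: y :: rest =>
    let r := pyAInner x (y :: rest)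
    (if r.1 ≠ 0 ∧ r.1 ≠ x then [("start", x), ("end", r.1)] else [("start", x)])
      :: pyAOuter r.2
termination_by l => l.length
decreasing_by
  simpa using Nat.lt_succ_of_le (pyAInner_length_le x (y :: rest))

def list_to_range_py (vlans_list : List Int) : List (List (String × Int)) :=
  pyAOuter (PySem.List.sorted
    ((PySem.Set.ofList vlans_list).filter (fun a => decide (a > 0) && decide (a < 4094)))
    (fun x => x) false)

-- ===== PORT B =====
-- one step of B's for-loop: extend the last open range or start a new one
-- (B's 'ranges' list kept most-recent-first; reversed before emitting, as Source B reads ranges[-1])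
def altStep (acc : List (Int × Int)) (v : Int) : List (Int × Int) :=
  match acc with
  | (s, e) :: t => if v = e + 1 then (s, v) :: t else (v, v) :: (s, e) :: t
  | [] => [(v, v)]

-- B's final comprehension: one range pair -> one dict
def altEmit (p : Int × Int) : List (String × Int) :=
  if p.1 = p.2 then [("start", p.1)] else [("start", p.1), ("end", p.2)]

def list_to_range_py_alt (vlans_list : List Int) : List (List (String × Int)) :=
  ((PySem.List.sorted
    (PySem.Set.ofList (vlans_list.filter (fun v => decide (0 < v) && decide (v < 4094))))
    (fun x => x) false).foldl altStep []).reverse.map altEmit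

-- ===== PRECONDITION & SPEC =====
def Spec_list_to_range_py (vlans_list : List Int) (out : List (List (String × Int))) : Prop := out = list_to_range_py_alt vlans_list
instance (vlans_list : List Int) (out : List (List (String × Int))) : Decidable (Spec_list_to_range_py vlans_list out) := by unfold Spec_list_to_range_py; infer_instance

-- ===== CLAIM (what is proved, stated in full; the proofs are below) =====
def Claim_equal_list_to_range_py : Prop := ∀ (vlans_list : List Int), Dom_list_to_range_py vlans_list → Spec_list_to_range_py vlans_list (list_to_range_py vlans_list)

-- ===== LEMMAS AND PROOFS =====

-- the end value only grows
lemma pyAInner_le (endv : Int) (l : List Int) : endv ≤ (pyAInner endv l).1 := by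
  induction l generalizing endv with
  | nil => simp [pyAInner]
  | cons x rest ih =>
    simp only [pyAInner]
    split
    · exact le_trans (by omega) (ih x)
    · exact le_refl _

-- the leftover list is made of elements of the input
lemma pyAInner_subset (endv : Int) (l : List Int) :
    ∀ v ∈ (pyAInner endv l).2, v ∈ l := by
  induction l generalizing endv with
  | nil => simp [pyAInner]
  | cons x rest ih =>
    simp only [pyAInner]
    split
    · intro v hv; exact List.mem_cons_of_mem x (ih x v hv)
    · intro v hv; exact hv

-- the head of the leftover list does not continue the finished run
lemma pyAInner_head (endv : Int) (l : List Int) :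
    ∀ y r, (pyAInner endv l).2 = y :: r → y ≠ (pyAInner endv l).1 + 1 := by
  induction l generalizing endv with
  | nil => simp [pyAInner]
  | cons x rest ih =>
    simp only [pyAInner]
    split
    · exact ih x
    · rename_i h
      intro y r hyr
      injection hyr with h1 _
      subst h1
      omega

-- B's fold consumes exactly the run A's inner loop consumes, producing the same range
lemma foldl_altStep_inner (rest : List Int) (s e : Int) (t : List (Int × Int)) :
    rest.foldl altStep ((s, e) :: t)
      = (pyAInner e rest).2.foldl altStep ((s, (pyAInner e rest).1) :: t) := by
  induction rest generalizing e with
  | nil => simp [pyAInner]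
  | cons y r ih =>
    simp only [pyAInner]
    split
    · rename_i h
      have hy : y = e + 1 := by omega
      simp only [List.foldl_cons, altStep, if_pos hy]
      exact ih y
    · rename_i h
      rfl

-- main loop correspondence, over any list of positive integers whose head does not
-- continue the range on top of B's accumulator
lemma main_loop : ∀ n (l : List Int), l.length ≤ n → (∀ v ∈ l, 0 < v) →
    ∀ acc : List (Int × Int),
    (match acc, l with | (_, e) :: _, y :: _ => y ≠ e + 1 | _, _ => True) →
    (l.foldl altStep acc).reverse.map altEmit
      = acc.reverse.map altEmit ++ pyAOuter l := by
  intro n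
  induction n with
  | zero =>
    intro l hl _ acc _
    have : l = [] := List.eq_nil_of_length_eq_zero (Nat.le_zero.mp hl)
    subst this
    rw [pyAOuter.eq_def]
    simp
  | succ n ih =>
    intro l hl hpos acc hguard
    match l with
    | [] => rw [pyAOuter.eq_def]; simp
    | [x] =>
      have hstep : altStep acc x = (x, x) :: acc := by
        match acc with
        | [] => rfl
        | (s, e) :: t =>
          simp only [altStep]
          rw [if_neg (by exact hguard)]
      rw [pyAOuter.eq_def]
      simp only [List.foldl_cons, List.foldl_nil, hstep]
      simp [altEmit]
    | x :: y :: rest =>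
      have hstep : altStep acc x = (x, x) :: acc := by
        match acc with
        | [] => rfl
        | (s, e) :: t =>
          simp only [altStep]
          rw [if_neg (by exact hguard)]
      have hx : 0 < x := hpos x (by simp)
      have hxe : x ≤ (pyAInner x (y :: rest)).1 := pyAInner_le x (y :: rest)
      have hrec := ih (pyAInner x (y :: rest)).2
        (by
          have := pyAInner_length_le x (y :: rest)
          simp only [List.length_cons] at *
          omega)
        (fun v hv => hpos v (List.mem_cons_of_mem x (pyAInner_subset x (y :: rest) v hv)))
        ((x, (pyAInner x (y :: rest)).1) :: acc)
        (by
          match hm : (pyAInner x (y :: rest)).2 with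
          | [] => trivial
          | z :: zr => exact pyAInner_head x (y :: rest) z zr hm)
      rw [pyAOuter.eq_def]
      simp only [List.foldl_cons, hstep,
        foldl_altStep_inner (y :: rest) x x acc, hrec]
      have hentry :
          altEmit (x, (pyAInner x (y :: rest)).1)
            = (if (pyAInner x (y :: rest)).1 ≠ 0 ∧ (pyAInner x (y :: rest)).1 ≠ x
               then [("start", x), ("end", (pyAInner x (y :: rest)).1)]
               else [("start", x)]) := by
        simp only [altEmit]
        by_cases hsx : x = (pyAInner x (y :: rest)).1
        · rw [if_pos hsx, if_neg (by omega)]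
        · rw [if_neg hsx, if_pos (by constructor <;> omega)]
      simp [hentry]

-- the two ports sort the same list: dedup-then-filter and filter-then-dedup are
-- permutations of each other, and sorting makes them equal
lemma sorted_lists_eq (l : List Int) (p : Int → Bool) :
    PySem.List.sorted ((PySem.Set.ofList l).filter p) (fun x => x) false
      = PySem.List.sorted (PySem.Set.ofList (l.filter p)) (fun x => x) false := by
  apply PySem.List.sorted_eq_sorted_of_perm _ _ _ (fun a b h => h)
  simp only [← PySem.List.dedup_eq_ofList]
  rw [List.perm_ext_iff_of_nodup
    ((PySem.List.nodup_dedup l).filter p) (PySem.List.nodup_dedup (l.filter p))]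
  intro a
  simp only [List.mem_filter, PySem.List.mem_dedup]

-- ===== VERDICT (by name: the statement is the Claim_ definition above) =====
theorem list_to_range_py_spec : Claim_equal_list_to_range_py := by
  intro vlans_list _
  unfold Spec_list_to_range_py list_to_range_py list_to_range_py_alt
  rw [sorted_lists_eq vlans_list (fun a => decide (a > 0) && decide (a < 4094))]
  set L := PySem.List.sorted
    (PySem.Set.ofList (vlans_list.filter (fun a => decide (a > 0) && decide (a < 4094))))
    (fun x => x) false with hL
  have hpos : ∀ v ∈ L, 0 < v := by
    intro v hv
    rw [hL, PySem.List.mem_sorted, ← PySem.List.dedup_eq_ofList, PySem.List.mem_dedup,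
      List.mem_filter] at hv
    have := hv.2
    simp only [Bool.and_eq_true, decide_eq_true_eq] at this
    exact this.1
  have := main_loop L.length L (le_refl _) hpos [] (by trivial)
  simpa using this.symm
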